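-- pv_equiv track=rewrite | github.com/Darkhouse13/publishing-service | app.py | _sorted_category_names
-- ===== SOURCE A (Python) =====
-- def _sorted_category_names(category_names: list[str], deprioritized_category: str = "") -> list[str]:
--     deprioritized_folded = deprioritized_category.casefold()
--     return sorted(
--         [name.strip() for name in category_names if isinstance(name, str) and name.strip()],
--         key=lambda name: (
--             bool(deprioritized_folded and name.casefold() == deprioritized_folded),
--             name.casefold(),
--         ),
--     )
-- ===== SOURCE B (Python) =====
-- def _sorted_category_names(category_names: list[str], deprioritized_category: str = "") -> list[str]:
--     deprioritized_folded = deprioritized_category.casefold()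
--     items = [name.strip() for name in category_names if isinstance(name, str) and name.strip()]
--
--     def is_dep(name: str) -> bool:
--         return bool(deprioritized_folded and name.casefold() == deprioritized_folded)
--
--     rest = sorted([n for n in items if not is_dep(n)], key=str.casefold)
--     dep = sorted([n for n in items if is_dep(n)], key=str.casefold)
--     return rest + dep
-- ===== Notes on version B (the rewrite author's own statement) =====
-- stated objective: alternative
-- what changed: Replaces the single sort with a composite (bool, casefold) key by a partition into deprioritized / other names followed by two plain casefold-keyed sorts and a concatenation.
import Mathlib
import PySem

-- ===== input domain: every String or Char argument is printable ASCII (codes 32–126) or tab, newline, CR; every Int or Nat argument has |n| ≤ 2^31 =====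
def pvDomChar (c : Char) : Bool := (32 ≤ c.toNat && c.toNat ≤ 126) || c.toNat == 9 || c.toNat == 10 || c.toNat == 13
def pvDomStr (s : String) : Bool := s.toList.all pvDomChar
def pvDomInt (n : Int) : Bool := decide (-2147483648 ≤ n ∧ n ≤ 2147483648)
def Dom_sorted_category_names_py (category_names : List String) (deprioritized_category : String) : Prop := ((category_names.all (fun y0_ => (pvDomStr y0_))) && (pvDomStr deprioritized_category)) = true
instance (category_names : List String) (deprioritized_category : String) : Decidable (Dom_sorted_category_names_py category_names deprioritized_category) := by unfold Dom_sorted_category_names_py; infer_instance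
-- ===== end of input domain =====

-- B replaces A's single sort with a composite (bool, casefold) key by a partition into
-- deprioritized / other names plus two plain casefold-keyed sorts and a concatenation (objective: alternative).
-- casefold is ported as PySem.Str.lower, exact on the ASCII domain.

-- ===== PORT A =====
def sorted_category_names_py (category_names : List String) (deprioritized_category : String) : List String :=
  let deprioritized_folded := PySem.Str.lower deprioritized_category
  PySem.List.sorted2
    ((category_names.filter (fun name => PySem.Str.strip name ≠ "")).map PySem.Str.strip)
    (fun name => (if deprioritized_folded ≠ "" && (PySem.Str.lower name == deprioritized_folded) then 1 else 0 : Nat))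
    (fun name => PySem.Str.lower name)

-- ===== PORT B =====
def sorted_category_names_py_alt (category_names : List String) (deprioritized_category : String) : List String :=
  let deprioritized_folded := PySem.Str.lower deprioritized_category
  let items := (category_names.filter (fun name => PySem.Str.strip name ≠ "")).map PySem.Str.strip
  let is_dep := fun (name : String) => deprioritized_folded ≠ "" && (PySem.Str.lower name == deprioritized_folded)
  let rest := PySem.List.sorted (items.filter (fun n => !is_dep n)) (fun n => PySem.Str.lower n)
  let dep := PySem.List.sorted (items.filter is_dep) (fun n => PySem.Str.lower n)
  rest ++ dep

-- ===== PRECONDITION & SPEC =====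
def Spec_sorted_category_names_py (category_names : List String) (deprioritized_category : String) (out : List String) : Prop := out = sorted_category_names_py_alt category_names deprioritized_category
instance (category_names : List String) (deprioritized_category : String) (out : List String) : Decidable (Spec_sorted_category_names_py category_names deprioritized_category out) := by unfold Spec_sorted_category_names_py; infer_instance

-- ===== CLAIM (what is proved, stated in full; the proofs are below) =====
def Claim_equal_sorted_category_names_py : Prop := ∀ (category_names : List String) (deprioritized_category : String), Dom_sorted_category_names_py category_names deprioritized_category → Spec_sorted_category_names_py category_names deprioritized_category (sorted_category_names_py category_names deprioritized_category)

-- ===== LEMMAS AND PROOFS =====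

-- insertBy computed with `before` equals insertBy with `before'` when both agree on x vs every element.
theorem pv_insertBy_congr {α : Type} (before before' : α → α → Bool) (x : α) (ys : List α)
    (h : ∀ y ∈ ys, before x y = before' x y) :
    PySem.List.insertBy before x ys = PySem.List.insertBy before' x ys := by
  induction ys with
  | nil => rfl
  | cons y ys ih =>
    simp only [PySem.List.insertBy]
    rw [h y (by simp)]
    split_ifs with hc
    · rfl
    · rw [ih (fun z hz => h z (by simp [hz]))]

-- x compares false against everything in A: insertion skips A.
theorem pv_insertBy_skip {α : Type} (before : α → α → Bool) (x : α) (A B : List α)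
    (h : ∀ a ∈ A, before x a = false) :
    PySem.List.insertBy before x (A ++ B) = A ++ PySem.List.insertBy before x B := by
  induction A with
  | nil => rfl
  | cons a A ih =>
    simp only [List.cons_append, PySem.List.insertBy]
    rw [h a (by simp)]
    simp only [Bool.false_eq_true, if_false]
    rw [ih (fun z hz => h z (by simp [hz]))]

-- x compares before everything in B: inserting into A ++ B inserts into A (appending at its end if nowhere earlier).
theorem pv_insertBy_into_left {α : Type} (before before' : α → α → Bool) (x : α) (A B : List α)
    (hA : ∀ a ∈ A, before x a = before' x a)
    (hB : ∀ b ∈ B, before x b = true) :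
    PySem.List.insertBy before x (A ++ B) = PySem.List.insertBy before' x A ++ B := by
  induction A with
  | nil =>
    cases B with
    | nil => rfl
    | cons b B =>
      simp only [List.nil_append, PySem.List.insertBy]
      rw [hB b (by simp)]
      rfl
  | cons a A ih =>
    simp only [List.cons_append, PySem.List.insertBy]
    rw [hA a (by simp)]
    split_ifs with hc
    · rfl
    · rw [ih (fun z hz => hA z (by simp [hz])), List.cons_append]

-- The composite-key insertion sort loop splits into two plain-key insertion sort loops over the partition.
theorem pv_fold_split {α : Type} (p : α → Bool) (k2 : α → String) (xs A B : List α)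
    (hA : ∀ a ∈ A, p a = false) (hB : ∀ b ∈ B, p b = true) :
    xs.foldl (fun acc x => PySem.List.insertBy
        (fun a b => decide ((if p a then (1:Nat) else 0) < (if p b then 1 else 0)) ||
          (!decide ((if p b then (1:Nat) else 0) < (if p a then 1 else 0)) && decide (k2 a < k2 b))) x acc) (A ++ B)
    = (xs.filter (fun x => !p x)).foldl
        (fun acc x => PySem.List.insertBy (fun a b => decide (k2 a < k2 b)) x acc) A
      ++ (xs.filter p).foldl
        (fun acc x => PySem.List.insertBy (fun a b => decide (k2 a < k2 b)) x acc) B := by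
  induction xs generalizing A B with
  | nil => simp
  | cons x xs ih =>
    simp only [List.foldl_cons, List.filter_cons]
    by_cases hx : p x = true
    · have hstep : PySem.List.insertBy
          (fun a b => decide ((if p a then (1:Nat) else 0) < (if p b then 1 else 0)) ||
            (!decide ((if p b then (1:Nat) else 0) < (if p a then 1 else 0)) && decide (k2 a < k2 b))) x (A ++ B)
          = A ++ PySem.List.insertBy (fun a b => decide (k2 a < k2 b)) x B := by
        rw [pv_insertBy_skip _ _ _ _ (fun a ha => by simp [hx, hA a ha])]
        rw [pv_insertBy_congr _ (fun a b => decide (k2 a < k2 b)) _ _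
          (fun b hb => by simp [hx, hB b hb])]
      rw [hstep, ih A _ hA (fun b hb => by
        rcases (PySem.List.mem_insertBy _ _ _ _).mp hb with h | h
        · exact h ▸ hx
        · exact hB b h)]
      simp [hx]
    · simp only [Bool.not_eq_true] at hx
      have hstep : PySem.List.insertBy
          (fun a b => decide ((if p a then (1:Nat) else 0) < (if p b then 1 else 0)) ||
            (!decide ((if p b then (1:Nat) else 0) < (if p a then 1 else 0)) && decide (k2 a < k2 b))) x (A ++ B)
          = PySem.List.insertBy (fun a b => decide (k2 a < k2 b)) x A ++ B := by
        exact pv_insertBy_into_left _ _ _ _ _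
          (fun a ha => by simp [hx, hA a ha])
          (fun b hb => by simp [hx, hB b hb])
      rw [hstep, ih _ B (fun a ha => by
        rcases (PySem.List.mem_insertBy _ _ _ _).mp ha with h | h
        · exact h ▸ hx
        · exact hA a h) hB]
      simp [hx]

-- ===== VERDICT (by name: the statement is the Claim_ definition above) =====
theorem sorted_category_names_py_spec : Claim_equal_sorted_category_names_py := by
  intro category_names deprioritized_category _
  show sorted_category_names_py category_names deprioritized_category = _
  unfold sorted_category_names_py sorted_category_names_py_alt
  simp only [PySem.List.sorted2, PySem.List.sorted]
  exact pv_fold_split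
    (fun name => PySem.Str.lower deprioritized_category ≠ "" &&
      (PySem.Str.lower name == PySem.Str.lower deprioritized_category))
    (fun name => PySem.Str.lower name)
    ((category_names.filter (fun name => PySem.Str.strip name ≠ "")).map PySem.Str.strip)
    [] [] (by simp) (by simp)
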